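-- pv_equiv track=rewrite | github.com/nguyenngochuy91/programming | interview/arrays.py | findHorizontal
-- ===== SOURCE A (Python) =====
-- def findHorizontal(crossword):
--     d ={}
--     row = len(crossword)
--     col = len(crossword[0])
--     for c in range(row):
--         r = 0
--         found = False
--         length = 0
--         while r<col:
--             if crossword[c][r]=="-":
--                 if not found:
--                     start= (c,r)
--                 length+=1
--                 found = True
--             else:
--                 if found: # we are done with 1 segment
--                     if length not in d:
--                         d[length]= []
--                     d[length].append(start)
--                     length=0
--                 found = False
--             r+=1
--         if found:
--             if length not in d:
--                 d[length]= []
--             d[length].append(start)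
--     if 1 in d:
--         d.pop(1)
--     return d
-- ===== SOURCE B (Python) =====
-- def findHorizontal(crossword):
--     d = {}
--     col = len(crossword[0])
--     for c, line in enumerate(crossword):
--         cells = line[:col]
--         r = 0
--         while r < len(cells):
--             if cells[r] == '-':
--                 start = r
--                 while r < len(cells) and cells[r] == '-':
--                     r += 1
--                 if r - start > 1:
--                     d.setdefault(r - start, []).append((c, start))
--             else:
--                 r += 1
--     return d
-- ===== Notes on version B (the rewrite author's own statement) =====
-- stated objective: alternative
-- what changed: A scans each row character by character with a found/length boolean state machine plus a post-loop flush and finally pops key 1; B slices each row to the first row's width and runs a two-pointer run-scan that records each dash run in one step via dict.setdefault, skipping length-1 runs up front.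
import Mathlib
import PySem

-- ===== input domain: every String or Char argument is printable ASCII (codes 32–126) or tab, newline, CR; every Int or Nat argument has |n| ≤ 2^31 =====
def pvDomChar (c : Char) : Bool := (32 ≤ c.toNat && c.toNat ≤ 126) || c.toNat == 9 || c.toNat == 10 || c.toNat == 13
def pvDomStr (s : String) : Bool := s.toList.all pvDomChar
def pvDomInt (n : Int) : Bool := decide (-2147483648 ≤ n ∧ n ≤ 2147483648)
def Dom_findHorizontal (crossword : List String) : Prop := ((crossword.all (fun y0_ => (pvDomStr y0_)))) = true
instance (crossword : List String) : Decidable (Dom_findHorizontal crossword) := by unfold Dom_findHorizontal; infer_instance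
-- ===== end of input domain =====

-- B replaces A's per-character boolean state machine (found/length flags + post-loop flush) by a
-- run-scanning two-pointer pass over each sliced row that records each dash run at once and skips
-- length-1 runs up front instead of popping key 1 afterwards; equal cost, alternative algorithm.

-- ===== PORT A =====
-- the body of A's inner 'while r < col' loop, one step (reads crossword[c][r])
def stepA (c : Int) (line : String)
    (st : PySem.Dict Int (List (Int × Int)) × Bool × Int × (Int × Int)) (r : Int) :
    PySem.Dict Int (List (Int × Int)) × Bool × Int × (Int × Int) :=
  match st with
  | (d, found, length, start) =>
    if (PySem.Str.pyGet? line r).getD ' ' = '-' then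
      let start := if !found then (c, r) else start
      (d, true, length + 1, start)
    else if found then
      (d.modify length [] (fun v => v ++ [start]), false, 0, start)
    else (d, false, length, start)

def findHorizontal (crossword : List String) : List (Int × List (Int × Int)) :=
  let row : Int := PySem.List.len crossword
  let col : Int := PySem.Str.len (PySem.List.pyGetD crossword 0 "")
  let d : PySem.Dict Int (List (Int × Int)) :=
    (PySem.List.pyRange 0 row).foldl (fun d c =>
      let line := PySem.List.pyGetD crossword c ""
      match (PySem.List.pyRange 0 col).foldl (stepA c line) (d, false, 0, ((0 : Int), (0 : Int))) with
      | (d, found, length, start) =>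
        if found then d.modify length [] (fun v => v ++ [start]) else d)
      PySem.Dict.empty
  let d := if d.contains 1 then d.erase 1 else d
  d.items

-- ===== PORT B =====
-- B's two while loops over one row's cells: scanRow is the outer loop (looking for a dash),
-- scanRun the inner one (consuming the current run begun at column `start`, `n` dashes so far;
-- on leaving the run it records it if longer than 1 and hands the rest back to the outer loop).
mutual
def scanRow (c : Int) (cells : List Char) (r : Int)
    (d : PySem.Dict Int (List (Int × Int))) : PySem.Dict Int (List (Int × Int)) :=
  match cells with
  | [] => d
  | ch :: rest => if ch = '-' then scanRun c rest (r + 1) r 1 d else scanRow c rest (r + 1) d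

def scanRun (c : Int) (cells : List Char) (r start n : Int)
    (d : PySem.Dict Int (List (Int × Int))) : PySem.Dict Int (List (Int × Int)) :=
  match cells with
  | [] => if 1 < n then d.modify n [] (fun v => v ++ [(c, start)]) else d
  | ch :: rest =>
    if ch = '-' then scanRun c rest (r + 1) start (n + 1) d
    else scanRow c rest (r + 1) (if 1 < n then d.modify n [] (fun v => v ++ [(c, start)]) else d)
end

def findHorizontal_alt (crossword : List String) : List (Int × List (Int × Int)) :=
  let col : Int := PySem.Str.len (PySem.List.pyGetD crossword 0 "")
  let d : PySem.Dict Int (List (Int × Int)) :=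
    (PySem.List.enumerate crossword).foldl
      (fun d p => scanRow p.1 (PySem.Str.slice p.2 none (some col)).toList 0 d)
      PySem.Dict.empty
  d.items

-- ===== PRECONDITION & SPEC =====
-- Pre_ excludes exactly the inputs where A raises IndexError: the empty grid (crossword[0]) and
-- grids whose first row is longer than some later row (crossword[c][r] for r < col).
def Pre_findHorizontal (crossword : List String) : Prop :=
  crossword ≠ [] ∧ ∀ s ∈ crossword, PySem.Str.len (crossword.headD "") ≤ PySem.Str.len s
instance (crossword : List String) : Decidable (Pre_findHorizontal crossword) := by
  unfold Pre_findHorizontal; infer_instance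

def pvWitness_findHorizontal : List String := ["a--b", "----"]

def Spec_findHorizontal (crossword : List String) (out : List (Int × List (Int × Int))) : Prop :=
  out = findHorizontal_alt crossword
instance (crossword : List String) (out : List (Int × List (Int × Int))) : Decidable (Spec_findHorizontal crossword out) := by unfold Spec_findHorizontal; infer_instance

-- ===== CLAIM (what is proved, stated in full; the proofs are below) =====
def Claim_equal_findHorizontal : Prop := ∀ (crossword : List String), Dom_findHorizontal crossword → Pre_findHorizontal crossword → Spec_findHorizontal crossword (findHorizontal crossword)

-- ===== LEMMAS AND PROOFS =====

-- record one dash run (length, start position) in the dict, A-style (every run)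
def ins (d : PySem.Dict Int (List (Int × Int))) (x : Int × (Int × Int)) :
    PySem.Dict Int (List (Int × Int)) :=
  d.modify x.1 [] (fun v => v ++ [x.2])

-- record a run B-style: only if its length exceeds 1
def insB (d : PySem.Dict Int (List (Int × Int))) (x : Int × (Int × Int)) :
    PySem.Dict Int (List (Int × Int)) :=
  if 1 < x.1 then ins d x else d

-- the dash runs of a row, as (length, (row index c, start column)) in left-to-right order;
-- runsP is the state inside a run (length L so far, started at p)
mutual
def runsF (c : Int) (cells : List Char) (s : Int) : List (Int × (Int × Int)) :=
  match cells with
  | [] => []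
  | ch :: rest => if ch = '-' then runsP c rest (s + 1) 1 (c, s) else runsF c rest (s + 1)

def runsP (c : Int) (cells : List Char) (s : Int) (L : Int) (p : Int × Int) :
    List (Int × (Int × Int)) :=
  match cells with
  | [] => [(L, p)]
  | ch :: rest => if ch = '-' then runsP c rest (s + 1) (L + 1) p else (L, p) :: runsF c rest (s + 1)
end

-- A's step reading the character directly
def stepP (c : Int) (st : PySem.Dict Int (List (Int × Int)) × Bool × Int × (Int × Int))
    (p : Int × Char) : PySem.Dict Int (List (Int × Int)) × Bool × Int × (Int × Int) :=
  match st with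
  | (d, found, length, start) =>
    if p.2 = '-' then
      let start := if !found then (c, p.1) else start
      (d, true, length + 1, start)
    else if found then
      (d.modify length [] (fun v => v ++ [start]), false, 0, start)
    else (d, false, length, start)

-- A's post-loop flush
def flushA (st : PySem.Dict Int (List (Int × Int)) × Bool × Int × (Int × Int)) :
    PySem.Dict Int (List (Int × Int)) :=
  if st.2.1 then st.1.modify st.2.2.1 [] (fun v => v ++ [st.2.2.2]) else st.1

-- A's row loop (with its flush) records exactly the runs of the row
lemma loopA_runs (c : Int) (cells : List Char) : ∀ (s : Int)
    (d : PySem.Dict Int (List (Int × Int))) (p0 : Int × Int) (L : Int) (p : Int × Int),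
    (flushA ((PySem.List.enumerate cells s).foldl (stepP c) (d, false, 0, p0))
      = (runsF c cells s).foldl ins d)
    ∧ (flushA ((PySem.List.enumerate cells s).foldl (stepP c) (d, true, L, p))
      = (runsP c cells s L p).foldl ins d) := by
  induction cells with
  | nil =>
    intro s d p0 L p
    simp [PySem.List.enumerate_nil, flushA, runsF, runsP, ins]
  | cons ch rest ih =>
    intro s d p0 L p
    constructor
    · rw [PySem.List.enumerate_cons]
      by_cases h : ch = '-'
      · rw [runsF, if_pos h]
        rw [List.foldl_cons, show stepP c (d, false, 0, p0) (s, ch) = (d, true, 0 + 1, (c, s))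
          from by simp [stepP, h]]
        exact (ih (s + 1) d p0 (0 + 1) (c, s)).2
      · rw [runsF, if_neg h]
        rw [List.foldl_cons, show stepP c (d, false, 0, p0) (s, ch) = (d, false, 0, p0)
          from by simp [stepP, h]]
        exact (ih (s + 1) d p0 L p).1
    · rw [PySem.List.enumerate_cons]
      by_cases h : ch = '-'
      · rw [runsP, if_pos h]
        rw [List.foldl_cons, show stepP c (d, true, L, p) (s, ch) = (d, true, L + 1, p)
          from by simp [stepP, h]]
        exact (ih (s + 1) d p0 (L + 1) p).2
      · rw [runsP, if_neg h, List.foldl_cons]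
        rw [List.foldl_cons, show stepP c (d, true, L, p) (s, ch)
            = (d.modify L [] (fun v => v ++ [p]), false, 0, p) from by simp [stepP, h]]
        exact (ih (s + 1) (d.modify L [] (fun v => v ++ [p])) p L p).1

-- B's row loops record exactly the runs longer than 1
lemma scanRow_runs (c : Int) (cells : List Char) : ∀ (r : Int)
    (d : PySem.Dict Int (List (Int × Int))) (start n : Int),
    (scanRow c cells r d = (runsF c cells r).foldl insB d)
    ∧ (scanRun c cells r start n d = (runsP c cells r n (c, start)).foldl insB d) := by
  induction cells with
  | nil =>
    intro r d start n
    simp [scanRow, scanRun, runsF, runsP, insB, ins]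
  | cons ch rest ih =>
    intro r d start n
    constructor
    · by_cases h : ch = '-'
      · simp only [scanRow, runsF, if_pos h]
        exact (ih (r + 1) d r 1).2
      · simp only [scanRow, runsF, if_neg h]
        exact (ih (r + 1) d start n).1
    · by_cases h : ch = '-'
      · simp only [scanRun, runsP, if_pos h]
        exact (ih (r + 1) d start (n + 1)).2
      · simp only [scanRun, runsP, if_neg h, List.foldl_cons, insB, ins]
        exact (ih (r + 1) _ start n).1

-- every run has length at least 1
lemma runs_pos (c : Int) (cells : List Char) : ∀ (s : Int) (L : Int) (p : Int × Int),
    (∀ x ∈ runsF c cells s, 1 ≤ x.1)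
    ∧ ((1 ≤ L) → ∀ x ∈ runsP c cells s L p, 1 ≤ x.1) := by
  induction cells with
  | nil =>
    intro s L p
    refine ⟨by simp [runsF], ?_⟩
    intro hL x hx
    rw [runsP] at hx
    have hx' := List.mem_singleton.1 hx
    subst hx'
    exact hL
  | cons ch rest ih =>
    intro s L p
    constructor
    · intro x hx
      by_cases h : ch = '-'
      · rw [runsF, if_pos h] at hx
        exact (ih (s + 1) 1 (c, s)).2 (by omega) x hx
      · rw [runsF, if_neg h] at hx
        exact (ih (s + 1) L p).1 x hx
    · intro hL x hx
      by_cases h : ch = '-'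
      · rw [runsP, if_pos h] at hx
        exact (ih (s + 1) (L + 1) p).2 (by omega) x hx
      · rw [runsP, if_neg h] at hx
        rcases List.mem_cons.1 hx with hx | hx
        · subst hx; simpa using hL
        · exact (ih (s + 1) L p).1 x hx

-- ---- dict facts about erase (the prelude has no erase lemmas) ----

lemma find?_filter_ne {ν : Type} (l : List (Int × ν)) (k k' : Int) (h : k ≠ k') :
    List.find? (fun p => p.1 == k) (List.filter (fun p => !(p.1 == k')) l)
      = List.find? (fun p => p.1 == k) l := by
  have hk : (k' == k) = false := by simp [Ne.symm h]
  induction l with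
  | nil => rfl
  | cons q l ih =>
    by_cases hq : q.1 = k
    · simp [hq, h]
    · by_cases hq' : q.1 = k'
      · simp [hq', ih, hk]
      · simp [hq, hq', ih]

lemma getD_erase_of_ne {ν : Type} (d : PySem.Dict Int ν) (k k' : Int) (v : ν) (h : k ≠ k') :
    (d.erase k').getD k v = d.getD k v := by
  cases d with
  | mk l =>
    simp only [PySem.Dict.getD, PySem.Dict.get?, PySem.Dict.erase]
    rw [find?_filter_ne l k k' h]

lemma filter_map_self {ν : Type} (l : List (Int × ν)) (k : Int) (v : ν) :
    List.filter (fun p => !(p.1 == k)) (List.map (fun p => if (p.1 == k) = true then (k, v) else p) l)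
      = List.filter (fun p => !(p.1 == k)) l := by
  induction l with
  | nil => rfl
  | cons q l ih =>
    simp only [List.map_cons, List.filter_cons]
    by_cases hq : q.1 = k
    · simpa [hq] using ih
    · simpa [hq] using ih

lemma erase_insert_self {ν : Type} (d : PySem.Dict Int ν) (k : Int) (v : ν) :
    (d.insert k v).erase k = d.erase k := by
  cases d with
  | mk l =>
    simp only [PySem.Dict.insert, PySem.Dict.erase]
    split
    · exact congrArg PySem.Dict.mk (filter_map_self l k v)
    · simp [List.filter_append]

lemma erase_insert_of_ne {ν : Type} (d : PySem.Dict Int ν) (k k' : Int) (v : ν) (h : k ≠ k') :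
    (d.insert k v).erase k' = (d.erase k').insert k v := by
  cases d with
  | mk l =>
    have hc : (PySem.Dict.mk (ν := ν) (List.filter (fun p => !(p.1 == k')) l)).contains k
        = (PySem.Dict.mk l).contains k := by
      simp only [PySem.Dict.contains, List.any_filter]
      refine PySem.List.any_congr_mem ?_
      intro x _
      by_cases hx : x.1 = k
      · simp [hx, h]
      · simp [hx]
    simp only [PySem.Dict.insert, PySem.Dict.erase] at *
    rw [hc]
    split
    · congr 1
      rw [List.filter_map]
      congr 1
      refine List.filter_congr ?_
      intro x _
      by_cases hx : x.1 = k
      · simp [Function.comp, hx]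
      · simp [Function.comp, hx]
    · simp [List.filter_append, h]

lemma erase_of_not_contains {ν : Type} (d : PySem.Dict Int ν) (k : Int)
    (h : d.contains k = false) : d.erase k = d := by
  cases d with
  | mk l =>
    simp only [PySem.Dict.contains, List.any_eq_false] at h
    simp only [PySem.Dict.erase]
    congr 1
    refine List.filter_eq_self.2 ?_
    intro p hp
    simpa using h p hp

lemma fold_ins_erase (S : List (Int × (Int × Int))) : ∀ (d : PySem.Dict Int (List (Int × Int))),
    (∀ x ∈ S, 1 ≤ x.1) → (S.foldl ins d).erase 1 = S.foldl insB (d.erase 1) := by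
  induction S with
  | nil => intro d _; rfl
  | cons x S ih =>
    intro d hpos
    have h1 : (1 : Int) ≤ x.1 := hpos x (by simp)
    rw [List.foldl_cons, List.foldl_cons, ih _ (fun y hy => hpos y (by simp [hy]))]
    congr 1
    by_cases hx : x.1 = 1
    · rw [insB, if_neg (by omega)]
      rw [ins, PySem.Dict.modify, hx, erase_insert_self]
    · rw [insB, if_pos (by omega)]
      rw [ins, ins, PySem.Dict.modify, PySem.Dict.modify,
        erase_insert_of_ne d x.1 1 _ hx, getD_erase_of_ne d x.1 1 [] hx]

-- one row of A: the indexed state-machine loop over crossword[c][0..col) equals the ins-fold of its runs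
lemma rowA_eq (col : Int) (hcol0 : 0 ≤ col) (c : Int) (line : String)
    (hlen : col.toNat ≤ line.toList.length) (d : PySem.Dict Int (List (Int × Int))) :
    flushA ((PySem.List.pyRange 0 col).foldl (stepA c line) (d, false, 0, ((0 : Int), (0 : Int))))
      = (runsF c (line.toList.take col.toNat) 0).foldl ins d := by
  set cells := line.toList.take col.toNat with hcells
  have hcellslen : cells.length = col.toNat := by
    rw [hcells, List.length_take]
    exact Nat.min_eq_left hlen
  have hcol' : col = PySem.List.len cells := by
    simp [PySem.List.len, hcellslen]
    omega
  have h1 : (PySem.List.pyRange 0 col).foldl (stepA c line) (d, false, 0, ((0 : Int), (0 : Int)))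
      = (PySem.List.enumerate cells).foldl (stepP c) (d, false, 0, ((0 : Int), (0 : Int))) := by
    rw [PySem.List.enumerate_eq_map_pyRange cells ' ', List.foldl_map, ← hcol']
    refine PySem.List.foldl_congr_mem _ _ _ _ ?_
    intro st r hr
    have hrr : 0 ≤ r ∧ r < col := by
      simpa [PySem.List.mem_pyRange_one] using hr
    have hr1 : r < (line.toList.length : Int) := by omega
    have hr2 : r < (cells.length : Int) := by
      rw [hcellslen]; omega
    have hchar : (PySem.Str.pyGet? line r).getD ' ' = PySem.List.pyGetD cells r ' ' := by
      show PySem.List.pyGetD line.toList r ' ' = _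
      rw [PySem.List.pyGetD_eq_getElem line.toList ' ' hrr.1 hr1,
        PySem.List.pyGetD_eq_getElem cells ' ' hrr.1 hr2]
      exact (List.getElem_take).symm
    rcases st with ⟨d', f', l', s'⟩
    simp only [stepA, stepP, hchar]
  rw [h1]
  exact (loopA_runs c cells 0 d (0, 0) 0 (0, 0)).1

-- the final assembly: A's pop of key 1 against B's up-front skip of length-1 runs
lemma assemble (cw : List String) (colN : Nat) :
    ∀ (dA dB : PySem.Dict Int (List (Int × Int))),
    dA = (PySem.List.enumerate cw).foldl
        (fun d p => (runsF p.1 (p.2.toList.take colN) 0).foldl ins d) PySem.Dict.empty →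
    dB = (PySem.List.enumerate cw).foldl
        (fun d p => (runsF p.1 (p.2.toList.take colN) 0).foldl insB d) PySem.Dict.empty →
    (if dA.contains 1 = true then dA.erase 1 else dA).items = dB.items := by
  intro dA dB hA hB
  subst hA hB
  rw [← List.foldl_flatMap, ← List.foldl_flatMap]
  have hposS : ∀ x ∈ (PySem.List.enumerate cw).flatMap
      (fun p => runsF p.1 (p.2.toList.take colN) 0), (1 : Int) ≤ x.1 := by
    intro x hx
    rw [List.mem_flatMap] at hx
    obtain ⟨p, _, hx⟩ := hx
    exact (runs_pos p.1 (p.2.toList.take colN) 0 1 (0, 0)).1 x hx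
  have hif : ∀ d : PySem.Dict Int (List (Int × Int)),
      (if d.contains 1 = true then d.erase 1 else d) = d.erase 1 := by
    intro d
    split
    · rfl
    · next h => exact (erase_of_not_contains d 1 (by simpa using h)).symm
  rw [hif, fold_ins_erase _ _ hposS]
  rfl

-- ===== VERDICT (by name: the statement is the Claim_ definition above) =====
theorem findHorizontal_spec : Claim_equal_findHorizontal := by
  intro cw hdom hpre
  obtain ⟨hne, hlen⟩ := hpre
  unfold Spec_findHorizontal
  have hcol0 : (0 : Int) ≤ PySem.Str.len (PySem.List.pyGetD cw 0 "") := by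
    simp [PySem.Str.len]
  set col : Int := PySem.Str.len (PySem.List.pyGetD cw 0 "") with hcoldef
  have hhead : PySem.List.pyGetD cw 0 "" = cw.headD "" := by
    cases cw with
    | nil => exact absurd rfl hne
    | cons a l => simp [PySem.List.pyGetD_zero_cons]
  have hrowlen : ∀ line ∈ cw, col.toNat ≤ line.toList.length := by
    intro line hl
    have := hlen line hl
    rw [← hhead, ← hcoldef] at this
    simp only [PySem.Str.len] at this
    omega
  simp only [findHorizontal, findHorizontal_alt]
  refine assemble cw col.toNat _ _ ?_ ?_
  · -- A's outer loop
    rw [PySem.List.enumerate_eq_map_pyRange cw "", List.foldl_map]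
    refine PySem.List.foldl_congr_mem _ _ _ _ ?_
    intro d c hc
    have hcr : 0 ≤ c ∧ c < (cw.length : Int) := by
      simpa [PySem.List.len, PySem.List.mem_pyRange_one] using hc
    have hmem : PySem.List.pyGetD cw c "" ∈ cw :=
      PySem.List.pyGetD_mem cw "" ⟨by omega, hcr.2⟩
    exact rowA_eq col hcol0 c (PySem.List.pyGetD cw c "") (hrowlen _ hmem) d
  · -- B's outer loop
    refine PySem.List.foldl_congr_mem _ _ _ _ ?_
    intro d p _
    have hslice : (PySem.Str.slice p.2 none (some col)).toList = p.2.toList.take col.toNat := by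
      show (String.ofList (PySem.Chars.slice p.2.toList none (some col))).toList = _
      rw [String.toList_ofList]
      exact PySem.List.slice_to p.2.toList hcol0
    rw [hslice]
    exact (scanRow_runs p.1 (p.2.toList.take col.toNat) 0 d 0 0).1
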